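-- pv_equiv track=rewrite | github.com/ruanrz/nda-demo | providers/word_generator.py | _merge_adjacent_diffs
-- ===== SOURCE A (Python) =====
-- from typing import List, Dict, Any, Optional
--
-- def _merge_adjacent_diffs(diffs: List[tuple]) -> List[tuple]:
--     """Merge consecutive diff entries that share the same operation."""
--     if not diffs:
--         return diffs
--     merged = [diffs[0]]
--     for op, text in diffs[1:]:
--         if op == merged[-1][0]:
--             merged[-1] = (op, merged[-1][1] + text)
--         else:
--             merged.append((op, text))
--     return merged
-- ===== SOURCE B (Python) =====
-- from itertools import groupby
-- from typing import List
--
-- def _merge_adjacent_diffs(diffs: List[tuple]) -> List[tuple]: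
--     """Merge consecutive diff entries that share the same operation."""
--     return [(op, ''.join(text for _, text in grp))
--             for op, grp in groupby(diffs, key=lambda d: d[0])]
-- ===== Notes on version B (the rewrite author's own statement) =====
-- stated objective: idiomatic
-- what changed: Replaces A's online accumulator loop that mutates the last merged entry with an itertools.groupby partition into maximal equal-op runs, each reduced by a single ''.join.
import Mathlib
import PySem

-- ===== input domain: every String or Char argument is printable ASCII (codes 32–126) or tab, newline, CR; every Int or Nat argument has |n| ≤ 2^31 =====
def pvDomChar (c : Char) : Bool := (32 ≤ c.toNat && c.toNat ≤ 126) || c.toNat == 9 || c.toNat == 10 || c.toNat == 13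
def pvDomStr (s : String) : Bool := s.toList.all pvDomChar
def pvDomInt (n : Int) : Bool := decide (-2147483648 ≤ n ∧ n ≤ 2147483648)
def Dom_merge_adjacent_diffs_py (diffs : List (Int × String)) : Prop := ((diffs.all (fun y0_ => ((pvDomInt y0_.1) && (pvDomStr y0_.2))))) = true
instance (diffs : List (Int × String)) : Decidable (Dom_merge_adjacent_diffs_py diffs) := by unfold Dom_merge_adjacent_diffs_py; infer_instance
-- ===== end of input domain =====

-- B replaces A's online accumulator loop (mutating the last merged entry) with a
-- groupby-style decomposition: split into maximal equal-op runs, join each run's texts.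


-- ===== PORT A =====
-- A's loop: 'merged' kept in reverse (head = merged[-1]); 'merged[-1] = …' replaces the head,
-- 'merged.append(…)' pushes a new head; the result is reversed at the end.
def mergeA_loop (acc : List (Int × String)) (rest : List (Int × String)) : List (Int × String) :=
  match rest with
  | [] => acc
  | (op, text) :: rs =>
    match acc with
    | [] => mergeA_loop [(op, text)] rs   -- unreachable: acc starts nonempty
    | (lop, ltext) :: tail =>
      if op = lop then mergeA_loop ((op, ltext ++ text) :: tail) rs
      else mergeA_loop ((op, text) :: (lop, ltext) :: tail) rs

def merge_adjacent_diffs_py (diffs : List (Int × String)) : List (Int × String) :=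
  match diffs with
  | [] => diffs
  | d :: rest => (mergeA_loop [d] rest).reverse

-- ===== PORT B =====
-- ''.join(…) ported by hand (exact: concatenation of the strings in order)
def joinTexts : List String → String
  | [] => ""
  | s :: r => s ++ joinTexts r

-- groupby: peel the maximal run sharing the first element's op, emit one merged tuple, recurse.
def merge_adjacent_diffs_py_alt (diffs : List (Int × String)) : List (Int × String) :=
  match diffs with
  | [] => []
  | (op, t) :: rest =>
    let grp := rest.takeWhile (fun d => decide (d.1 = op))
    let rest' := rest.dropWhile (fun d => decide (d.1 = op))
    (op, joinTexts (t :: grp.map Prod.snd)) :: merge_adjacent_diffs_py_alt rest'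
termination_by diffs.length
decreasing_by
  simp only [List.length_cons]
  exact Nat.lt_succ_of_le (List.length_dropWhile_le _ _)

-- ===== PRECONDITION & SPEC =====
def Spec_merge_adjacent_diffs_py (diffs : List (Int × String)) (out : List (Int × String)) : Prop := out = merge_adjacent_diffs_py_alt diffs
instance (diffs : List (Int × String)) (out : List (Int × String)) : Decidable (Spec_merge_adjacent_diffs_py diffs out) := by unfold Spec_merge_adjacent_diffs_py; infer_instance

-- ===== CLAIM (what is proved, stated in full; the proofs are below) =====
def Claim_equal_merge_adjacent_diffs_py : Prop := ∀ (diffs : List (Int × String)), Dom_merge_adjacent_diffs_py diffs → Spec_merge_adjacent_diffs_py diffs (merge_adjacent_diffs_py diffs)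

-- ===== LEMMAS AND PROOFS =====
theorem mergeA_loop_eq (rest : List (Int × String)) :
    ∀ (op : Int) (t : String) (tail : List (Int × String)),
    (mergeA_loop ((op, t) :: tail) rest).reverse =
      tail.reverse ++
        (op, joinTexts (t :: (rest.takeWhile (fun d => decide (d.1 = op))).map Prod.snd)) ::
          merge_adjacent_diffs_py_alt (rest.dropWhile (fun d => decide (d.1 = op))) := by
  induction rest with
  | nil =>
    intro op t tail
    simp [mergeA_loop, merge_adjacent_diffs_py_alt, joinTexts]
  | cons d rs ih =>
    intro op t tail
    obtain ⟨op2, t2⟩ := d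
    by_cases h : op2 = op
    · subst h
      simp only [mergeA_loop, if_true]
      rw [ih]
      simp [List.takeWhile, List.dropWhile, joinTexts, String.append_assoc]
    · simp only [mergeA_loop]
      rw [if_neg h, ih]
      conv_rhs => rw [merge_adjacent_diffs_py_alt.eq_def]
      simp [List.takeWhile, List.dropWhile, h, joinTexts]

theorem merge_adjacent_diffs_py_eq (diffs : List (Int × String)) :
    merge_adjacent_diffs_py diffs = merge_adjacent_diffs_py_alt diffs := by
  match diffs with
  | [] => simp [merge_adjacent_diffs_py, merge_adjacent_diffs_py_alt]
  | (op, t) :: rest =>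
    show (mergeA_loop [(op, t)] rest).reverse = _
    rw [mergeA_loop_eq]
    conv_rhs => rw [merge_adjacent_diffs_py_alt.eq_def]
    simp [joinTexts]

-- ===== VERDICT (by name: the statement is the Claim_ definition above) =====
theorem merge_adjacent_diffs_py_spec : Claim_equal_merge_adjacent_diffs_py := by
  intro diffs _
  exact merge_adjacent_diffs_py_eq diffs
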